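-- pv_equiv track=rewrite | github.com/Hotasiii/Kriptokoding2023 | playfair_cipher.py | group_fill
-- ===== SOURCE A (Python) =====
-- def group_fill(input):
--     final_input = []
--     k = len(input)
--     current_index = 0
--     while (current_index < k):
--         # Jika belum sampai akhir kalimat, grouping dilakukan secara normal
--         if (current_index != k-1):
--             # Jika kedua huruf beda, digabungkan
--             if (input[current_index] != input[current_index+1]):
--                 final_input.append(input[current_index] + input[current_index+1])
--                 current_index += 2
--             # Jika kedua huruf sama, huruf pertama digabung dengan huruf "x"
--             else:
--                 final_input.append(input[current_index] + "x")
--                 current_index += 1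
--         # Jika sisa satu karakter terakhir, digavung dengan huruf "z"
--         else:
--             final_input.append(input[current_index] + "z")
--             current_index += 1
--     return final_input
-- ===== SOURCE B (Python) =====
-- def group_fill(input):
--     # Left fold over the characters with a single (emitted, pending) state,
--     # instead of A's index walk with variable-step lookahead.
--     def step(state, c):
--         acc, p = state
--         if p is None:
--             return (acc, c)
--         if p == c:
--             return (acc + [p + "x"], c)
--         return (acc + [p + c], None)
--     state = ([], None)
--     for c in input:
--         state = step(state, c)
--     acc, p = state
--     return acc if p is None else acc + [p + "z"]
-- ===== Notes on version B (the rewrite author's own statement) =====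
-- stated objective: alternative
-- what changed: Replaced the index-based while loop with variable-step lookahead (peeking at input[i+1] and advancing by 1 or 2) by a left fold over the characters with an (emitted, pending) state and a final 'z' flush of the pending character.
import Mathlib
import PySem

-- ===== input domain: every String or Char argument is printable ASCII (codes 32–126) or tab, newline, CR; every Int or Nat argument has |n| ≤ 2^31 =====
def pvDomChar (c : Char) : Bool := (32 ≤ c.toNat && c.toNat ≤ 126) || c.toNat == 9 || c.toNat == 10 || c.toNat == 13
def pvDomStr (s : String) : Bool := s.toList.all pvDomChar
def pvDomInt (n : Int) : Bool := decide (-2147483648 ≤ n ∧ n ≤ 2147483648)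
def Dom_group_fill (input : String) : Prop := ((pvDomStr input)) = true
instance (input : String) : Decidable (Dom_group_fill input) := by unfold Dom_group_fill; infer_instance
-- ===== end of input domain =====

-- B replaces A's index/lookahead while-loop by a left fold over the characters with an (emitted, pending) state (alternative decomposition, same cost).


-- ===== PORT A =====
-- A scans by index; the index advances 2 on a differing pair, 1 on an equal pair
-- (reprocessing the duplicate) or on the trailing single char. Recursion on the
-- remaining character list is the literal image of that index walk.
def group_fill_goA : List Char → List String
  | [] => []
  | [c] => [String.mk [c, 'z']]
  | c1 :: c2 :: rest =>
      if c1 ≠ c2 then String.mk [c1, c2] :: group_fill_goA rest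
      else String.mk [c1, 'x'] :: group_fill_goA (c2 :: rest)

def group_fill (input : String) : List String := group_fill_goA input.toList

-- ===== PORT B =====
-- left fold with (emitted, pending) state; trailing pending flushed with 'z'
def group_fill_step (st : List String × Option Char) (c : Char) : List String × Option Char :=
  match st with
  | (acc, none) => (acc, some c)
  | (acc, some p) =>
      if p = c then (acc ++ [String.mk [p, 'x']], some c)
      else (acc ++ [String.mk [p, c]], none)

def group_fill_alt (input : String) : List String :=
  match input.toList.foldl group_fill_step ([], none) with
  | (acc, none) => acc
  | (acc, some p) => acc ++ [String.mk [p, 'z']]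

-- ===== PRECONDITION & SPEC =====
def Spec_group_fill (input : String) (out : List String) : Prop := out = group_fill_alt input
instance (input : String) (out : List String) : Decidable (Spec_group_fill input out) := by unfold Spec_group_fill; infer_instance

-- ===== CLAIM (what is proved, stated in full; the proofs are below) =====
def Claim_equal_group_fill : Prop := ∀ (input : String), Dom_group_fill input → Spec_group_fill input (group_fill input)

-- ===== LEMMAS AND PROOFS =====
-- proof-only intermediate: the fold's meaning as a recursion on the character list
def pvGoB : Option Char → List Char → List String
  | none, [] => []
  | some p, [] => [String.mk [p, 'z']]
  | none, c :: rest => pvGoB (some c) rest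
  | some p, c :: rest =>
      if p = c then String.mk [p, 'x'] :: pvGoB (some c) rest
      else String.mk [p, c] :: pvGoB none rest

def pvFinish : List String × Option Char → List String
  | (acc, none) => acc
  | (acc, some p) => acc ++ [String.mk [p, 'z']]

theorem pvFold_eq : ∀ (l : List Char) (acc : List String) (pend : Option Char),
    pvFinish (l.foldl group_fill_step (acc, pend)) = acc ++ pvGoB pend l := by
  intro l
  induction l with
  | nil =>
      intro acc pend
      cases pend <;> simp [pvFinish, pvGoB]
  | cons c rest ih =>
      intro acc pend
      cases pend with
      | none =>
          simp [List.foldl, group_fill_step, ih, pvGoB]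
      | some p =>
          by_cases hpc : p = c
          · subst hpc
            simp [List.foldl, group_fill_step, ih, pvGoB]
          · simp [List.foldl, group_fill_step, hpc, ih, pvGoB]

theorem pvGoB_eq_goA : ∀ (n : Nat) (l : List Char), l.length ≤ n →
    pvGoB none l = group_fill_goA l ∧
    ∀ p, pvGoB (some p) l = group_fill_goA (p :: l) := by
  intro n
  induction n with
  | zero =>
      intro l hl
      have : l = [] := List.eq_nil_of_length_eq_zero (Nat.le_zero.mp hl)
      subst this
      exact ⟨rfl, fun p => rfl⟩
  | succ n ih =>
      intro l hl
      cases l with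
      | nil => exact ⟨rfl, fun p => rfl⟩
      | cons c rest =>
          have hr : rest.length ≤ n := by simpa using Nat.succ_le_succ_iff.mp hl
          obtain ⟨ihnone, ihsome⟩ := ih rest hr
          constructor
          · simpa [pvGoB] using ihsome c
          · intro p
            by_cases hpc : p = c
            · subst hpc
              simp [pvGoB, group_fill_goA, ihsome]
            · simp [pvGoB, group_fill_goA, hpc, ihnone]

-- ===== VERDICT (by name: the statement is the Claim_ definition above) =====
theorem group_fill_spec : Claim_equal_group_fill := by
  intro input _
  unfold Spec_group_fill group_fill group_fill_alt
  have h1 : pvFinish (input.toList.foldl group_fill_step ([], none)) = pvGoB none input.toList := by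
    simpa using pvFold_eq input.toList [] none
  have h2 := (pvGoB_eq_goA input.toList.length input.toList le_rfl).1
  rw [show (match input.toList.foldl group_fill_step ([], none) with
      | (acc, none) => acc
      | (acc, some p) => acc ++ [String.mk [p, 'z']]) =
      pvFinish (input.toList.foldl group_fill_step ([], none)) from rfl, h1, h2]
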